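-- pv_equiv track=rewrite | github.com/SubhasisMahanty/Python-Practices- | check division and print next big no divisible.py | check_division
-- ===== SOURCE A (Python) =====
-- def check_division(a,b):
--     t = False
--     d = a+1
--     while t == False:
--         if d % b == 0:
--             t = True
--             return d
--         else:
--             d +=1
-- ===== SOURCE B (Python) =====
-- def check_division(a, b):
--     b = abs(b)
--     return a + b - a % b
-- ===== Notes on version B (the rewrite author's own statement) =====
-- stated objective: faster
-- what changed: Replaced the linear while-loop scan for the next multiple of b with a closed-form ceiling computation a + |b| - a % |b|.
import Mathlib
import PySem

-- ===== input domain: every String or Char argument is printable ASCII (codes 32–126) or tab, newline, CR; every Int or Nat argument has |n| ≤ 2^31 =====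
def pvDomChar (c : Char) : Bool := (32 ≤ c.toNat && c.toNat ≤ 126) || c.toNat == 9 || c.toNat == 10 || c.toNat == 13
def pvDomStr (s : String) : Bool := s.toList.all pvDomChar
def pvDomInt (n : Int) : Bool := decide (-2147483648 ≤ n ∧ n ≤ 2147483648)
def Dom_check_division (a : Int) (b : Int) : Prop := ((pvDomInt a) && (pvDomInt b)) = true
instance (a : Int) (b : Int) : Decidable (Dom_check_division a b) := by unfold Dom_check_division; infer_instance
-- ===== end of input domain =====

-- B replaces A's linear scan for the next multiple of b with the closed form a + |b| - a % |b| (O(1) instead of O(|b|)).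


-- ===== PORT A =====
-- A's `while` loop: from d = a+1, keep incrementing until d % b == 0, then return d.
-- Ported as a fuel recursion; for b ≠ 0 fuel |b| suffices (a multiple occurs within |b| steps),
-- so on every input of Pre_ the port returns exactly what the Python loop returns.
def check_division_loop (b : Int) : Nat → Int → Int
  | 0, d => d
  | n+1, d => if PySem.Int.mod d b = 0 then d else check_division_loop b n (d+1)

def check_division (a : Int) (b : Int) : Int :=
  check_division_loop b b.natAbs (a+1)

-- ===== PORT B =====
def check_division_alt (a : Int) (b : Int) : Int :=
  let b' := |b|
  a + b' - PySem.Int.mod a b'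

-- ===== PRECONDITION & SPEC =====
-- A raises ZeroDivisionError when b = 0 (d % 0);this is the only excluded input.
def Pre_check_division (a : Int) (b : Int) : Prop := b ≠ 0
instance (a : Int) (b : Int) : Decidable (Pre_check_division a b) := by unfold Pre_check_division; infer_instance
def pvWitness_check_division : Int × Int := (5, 3)

def Spec_check_division (a : Int) (b : Int) (out : Int) : Prop := out = check_division_alt a b
instance (a : Int) (b : Int) (out : Int) : Decidable (Spec_check_division a b out) := by unfold Spec_check_division; infer_instance

-- ===== CLAIM (what is proved, stated in full; the proofs are below) =====
def Claim_equal_check_division : Prop := ∀ (a : Int) (b : Int), Dom_check_division a b → Pre_check_division a b → Spec_check_division a b (check_division a b)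

-- ===== LEMMAS AND PROOFS =====

-- The loop returns t when t is the least multiple of b that is ≥ d and fuel covers the distance.
lemma check_division_loop_eq (b : Int) (hb : b ≠ 0) :
    ∀ (f : Nat) (d t : Int), b ∣ t → d ≤ t → t - d < (f : Int) →
      (∀ e, d ≤ e → e < t → ¬ b ∣ e) → check_division_loop b f d = t := by
  intro f
  induction f with
  | zero => intro d t _ h1 h2 _; omega
  | succ n ih =>
    intro d t hdvd h1 h2 hmin
    unfold check_division_loop
    by_cases hd : PySem.Int.mod d b = 0
    · simp only [hd, if_pos rfl]
      rw [PySem.Int.mod_eq_zero_iff_dvd] at hd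
      by_contra hne
      exact hmin d le_rfl (lt_of_le_of_ne h1 hne) hd
    · simp only [hd, if_neg]
      have hdne : ¬ b ∣ d := by
        intro h; exact hd ((PySem.Int.mod_eq_zero_iff_dvd d b).mpr h)
      have hdt : d < t := lt_of_le_of_ne h1 (fun h => hdne (h ▸ hdvd))
      apply ih (d+1) t hdvd (by omega) (by push_cast; push_cast at h2; omega)
      intro e he1 he2
      exact hmin e (by omega) he2

-- ===== VERDICT =====
theorem check_division_spec : Claim_equal_check_division := by
  intro a b _ hb
  unfold Spec_check_division check_division check_division_alt
  show check_division_loop b b.natAbs (a+1) = a + |b| - PySem.Int.mod a |b|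
  set b' : Int := |b| with hb'
  have hb'pos : 0 < b' := abs_pos.mpr hb
  have hmod := PySem.Int.mod_eq_emod_of_pos (a := a) hb'pos
  set r : Int := PySem.Int.mod a b' with hr
  have hr0 : 0 ≤ r := PySem.Int.mod_nonneg a hb'pos
  have hrlt : r < b' := PySem.Int.mod_lt a hb'pos
  have hdvdr : b' ∣ (a - r) := by
    exact ⟨a / b', by rw [hmod, Int.emod_def]; ring⟩
  apply check_division_loop_eq b hb
  · -- b ∣ t
    have h1 : b' ∣ (a + b' - r) := by
      have h2 : a + b' - r = (a - r) + b' := by ring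
      rw [h2]; exact dvd_add hdvdr dvd_rfl
    exact (abs_dvd b _).mp (hb' ▸ h1)
  · omega
  · have : (b.natAbs : Int) = b' := by simp [hb']
    omega
  · intro e he1 he2 hdvd
    have hbe : b' ∣ e := (abs_dvd b e).mpr hdvd
    have hbar : b' ∣ (a - r) := hdvdr
    have : b' ∣ (e - (a - r)) := dvd_sub hbe hbar
    have hlow : 0 < e - (a - r) := by omega
    have hhigh : e - (a - r) < b' + b' := by omega
    -- e - (a - r) is a positive multiple of b' less than 2b', hence = b'; then e = a + b' - r = t, contradiction
    obtain ⟨k, hk⟩ := this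
    have hk1 : k = 1 := by
      rcases lt_trichotomy k 1 with h | h | h
      · nlinarith
      · exact h
      · nlinarith
    rw [hk1, mul_one] at hk
    omega
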